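-- pv_equiv track=rewrite | github.com/gannetson/jizz | jizz/ebird_st_commonness.py | _select_species_stats_obj_key
-- ===== SOURCE A (Python) =====
-- from typing import Any, List, Optional
--
-- def _select_species_stats_obj_key(
--     paths: object, species_code: str, version_year: int
-- ) -> Optional[str]:
--     if not isinstance(paths, list):
--         return None
--     str_paths = [p for p in paths if isinstance(p, str)]
--     for p in str_paths:
--         if p.endswith("species_stats.csv"):
--             return p
--
--     sp = species_code.strip().lower()
--     y = str(int(version_year))
--     suffix = f"{sp}_species_{y}.zip"
--     for p in str_paths:
--         if p.lower().endswith(suffix):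
--             return p
--
--     for p in str_paths:
--         pl = p.replace("\\", "/").lower()
--         if "web_download" not in pl:
--             continue
--         if not pl.endswith(".zip"):
--             continue
--         if sp not in pl:
--             continue
--         if "species" in pl and "regional" not in pl:
--             return p
--
--     for p in str_paths:
--         pl = p.lower()
--         if pl.endswith(".zip") and "ebird-trends" in pl and "species" in pl:
--             return p
--
--     for p in str_paths:
--         pl = p.lower()
--         if pl.endswith(".zip") and "species" in pl and "regional" not in pl:
--             return p
--
--     return None
-- ===== SOURCE B (Python) =====
-- def _select_species_stats_obj_key(paths, species_code, version_year):
--     if not isinstance(paths, list):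
--         return None
--     sp = species_code.strip().lower()
--     suffix = "".join([sp, "_species_", str(int(version_year)), ".zip"])
--
--     def priority(p):
--         if p.endswith("species_stats.csv"):
--             return 1
--         if p.lower().endswith(suffix):
--             return 2
--         pn = p.replace("\\", "/").lower()
--         if "web_download" in pn and pn.endswith(".zip") and sp in pn and "species" in pn and "regional" not in pn:
--             return 3
--         pl = p.lower()
--         if pl.endswith(".zip") and "ebird-trends" in pl and "species" in pl:
--             return 4
--         if pl.endswith(".zip") and "species" in pl and "regional" not in pl:
--             return 5
--         return None
--
--     best = None  # (priority, path); strict < keeps the earliest path per priority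
--     for p in paths:
--         if not isinstance(p, str):
--             continue
--         k = priority(p)
--         if k is not None and (best is None or k < best[0]):
--             best = (k, p)
--     return best[1] if best is not None else None
-- ===== Notes on version B (the rewrite author's own statement) =====
-- stated objective: alternative
-- what changed: Replaces five sequential scans of the path list with a single pass that assigns each path its lowest matching priority (1=csv, 2=exact suffix, 3=web_download zip, 4=ebird-trends zip, 5=generic species zip) and keeps the earliest path of minimal priority.
import Mathlib
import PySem

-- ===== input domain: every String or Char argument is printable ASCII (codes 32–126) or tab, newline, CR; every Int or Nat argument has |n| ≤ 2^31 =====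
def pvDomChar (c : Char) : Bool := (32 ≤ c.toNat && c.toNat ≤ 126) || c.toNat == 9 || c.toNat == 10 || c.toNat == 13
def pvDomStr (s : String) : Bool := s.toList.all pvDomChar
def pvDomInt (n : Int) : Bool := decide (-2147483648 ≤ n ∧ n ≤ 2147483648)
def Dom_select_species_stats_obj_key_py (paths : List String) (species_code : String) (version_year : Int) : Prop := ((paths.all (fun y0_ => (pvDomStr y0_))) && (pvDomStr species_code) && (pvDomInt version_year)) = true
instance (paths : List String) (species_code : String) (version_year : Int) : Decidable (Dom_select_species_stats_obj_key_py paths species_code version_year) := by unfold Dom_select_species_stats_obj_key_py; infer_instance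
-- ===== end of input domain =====

-- B replaces A's five sequential scans of the path list by ONE scan that gives each path
-- its lowest matching priority and keeps the earliest path of minimal priority (objective: alternative).
-- (A's `paths: object` isinstance/str-filter guards are vacuous under the typed signature List String.)

-- ===== PORT A =====
def select_species_stats_obj_key_py (paths : List String) (species_code : String) (version_year : Int) : Option String :=
  let str_paths := paths
  match str_paths.find? (fun p => PySem.Str.endswith p "species_stats.csv") with
  | some p => some p
  | none =>
    let sp := PySem.Str.lower (PySem.Str.strip species_code)
    let y := PySem.Int.toStr version_year
    let suffix := PySem.Str.join "" [sp, "_species_", y, ".zip"]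
    match str_paths.find? (fun p => PySem.Str.endswith (PySem.Str.lower p) suffix) with
    | some p => some p
    | none =>
      match str_paths.find? (fun p =>
          let pl := PySem.Str.lower (PySem.Str.replace p "\\" "/")
          PySem.Str.isIn "web_download" pl && PySem.Str.endswith pl ".zip" &&
            PySem.Str.isIn sp pl && (PySem.Str.isIn "species" pl && !PySem.Str.isIn "regional" pl)) with
      | some p => some p
      | none =>
        match str_paths.find? (fun p =>
            let pl := PySem.Str.lower p
            PySem.Str.endswith pl ".zip" && PySem.Str.isIn "ebird-trends" pl && PySem.Str.isIn "species" pl) with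
        | some p => some p
        | none =>
          str_paths.find? (fun p =>
            let pl := PySem.Str.lower p
            PySem.Str.endswith pl ".zip" && PySem.Str.isIn "species" pl && !PySem.Str.isIn "regional" pl)

-- ===== PORT B =====
-- B-side helper: the lowest matching priority of one path (Source B's `priority`)
def pvPrio (sp suffix : String) (p : String) : Option Nat :=
  if PySem.Str.endswith p "species_stats.csv" then some 1
  else if PySem.Str.endswith (PySem.Str.lower p) suffix then some 2
  else
    let pn := PySem.Str.lower (PySem.Str.replace p "\\" "/")
    if PySem.Str.isIn "web_download" pn && PySem.Str.endswith pn ".zip" &&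
        PySem.Str.isIn sp pn && PySem.Str.isIn "species" pn && !PySem.Str.isIn "regional" pn then some 3
    else
      let pl := PySem.Str.lower p
      if PySem.Str.endswith pl ".zip" && PySem.Str.isIn "ebird-trends" pl && PySem.Str.isIn "species" pl then some 4
      else if PySem.Str.endswith pl ".zip" && PySem.Str.isIn "species" pl && !PySem.Str.isIn "regional" pl then some 5
      else none

-- B-side helper: the loop body (strict < keeps the earliest path per priority)
def pvStep (sp suffix : String) (acc : Option (Nat × String)) (p : String) : Option (Nat × String) :=
  match pvPrio sp suffix p with
  | none => acc
  | some k =>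
    match acc with
    | none => some (k, p)
    | some (bk, bp) => if k < bk then some (k, p) else some (bk, bp)

def select_species_stats_obj_key_py_alt (paths : List String) (species_code : String) (version_year : Int) : Option String :=
  let sp := PySem.Str.lower (PySem.Str.strip species_code)
  let suffix := PySem.Str.join "" [sp, "_species_", PySem.Int.toStr version_year, ".zip"]
  (paths.foldl (pvStep sp suffix) none).map Prod.snd

-- ===== PRECONDITION & SPEC =====
def Spec_select_species_stats_obj_key_py (paths : List String) (species_code : String) (version_year : Int) (out : Option String) : Prop := out = select_species_stats_obj_key_py_alt paths species_code version_year
instance (paths : List String) (species_code : String) (version_year : Int) (out : Option String) : Decidable (Spec_select_species_stats_obj_key_py paths species_code version_year out) := by unfold Spec_select_species_stats_obj_key_py; infer_instance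

-- ===== CLAIM (what is proved, stated in full; the proofs are below) =====
def Claim_equal_select_species_stats_obj_key_py : Prop := ∀ (paths : List String) (species_code : String) (version_year : Int), Dom_select_species_stats_obj_key_py paths species_code version_year → Spec_select_species_stats_obj_key_py paths species_code version_year (select_species_stats_obj_key_py paths species_code version_year)

-- ===== LEMMAS AND PROOFS =====

-- merging two best-candidates: keep the lower priority, left wins ties
def pvMerge (a b : Option (Nat × String)) : Option (Nat × String) :=
  match a, b with
  | a, none => a
  | none, b => b
  | some (ka, pa), some (kb, pb) => if kb < ka then some (kb, pb) else some (ka, pa)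

theorem pvMerge_none_left (b : Option (Nat × String)) : pvMerge none b = b := by
  cases b <;> rfl
theorem pvMerge_none_right (a : Option (Nat × String)) : pvMerge a none = a := by
  cases a <;> rfl
theorem pvMerge_eq_none (a b : Option (Nat × String)) (h : pvMerge a b = none) :
    a = none ∧ b = none := by
  rcases a with _ | ⟨ka, pa⟩ <;> rcases b with _ | ⟨kb, pb⟩ <;> simp_all [pvMerge]
  split_ifs at h
theorem pvMerge_assoc (a b c : Option (Nat × String)) :
    pvMerge (pvMerge a b) c = pvMerge a (pvMerge b c) := by
  rcases a with _ | ⟨ka, pa⟩ <;> rcases b with _ | ⟨kb, pb⟩ <;> rcases c with _ | ⟨kc, pc⟩ <;>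
    (try simp only [pvMerge_none_left, pvMerge_none_right])
  by_cases h1 : kb < ka <;> by_cases h2 : kc < kb <;> by_cases h3 : kc < ka <;>
    simp [pvMerge, h1, h2, h3] <;> omega

theorem pvStep_eq_merge (sp suffix : String) (acc : Option (Nat × String)) (p : String) :
    pvStep sp suffix acc p = pvMerge acc ((pvPrio sp suffix p).map (fun k => (k, p))) := by
  unfold pvStep pvMerge
  cases pvPrio sp suffix p <;> cases acc <;> simp

theorem pvFoldl_merge (sp suffix : String) (l : List String) (acc : Option (Nat × String)) :
    l.foldl (pvStep sp suffix) acc = pvMerge acc (l.foldl (pvStep sp suffix) none) := by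
  induction l generalizing acc with
  | nil => rw [List.foldl_nil, List.foldl_nil, pvMerge_none_right]
  | cons x l ih =>
    simp only [List.foldl_cons]
    rw [ih (pvStep sp suffix acc x), ih (pvStep sp suffix none x),
        pvStep_eq_merge, pvStep_eq_merge, pvMerge_assoc, pvMerge_none_left]

theorem pvBest_cons (sp suffix : String) (x : String) (l : List String) :
    (x :: l).foldl (pvStep sp suffix) none =
      pvMerge ((pvPrio sp suffix x).map (fun k => (k, x))) (l.foldl (pvStep sp suffix) none) := by
  rw [List.foldl_cons, pvFoldl_merge, pvStep_eq_merge, pvMerge_none_left]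

theorem pvBest_none (sp suffix : String) (l : List String) :
    l.foldl (pvStep sp suffix) none = none → ∀ p ∈ l, pvPrio sp suffix p = none := by
  induction l with
  | nil => intro _ p hp; cases hp
  | cons x l ih =>
    rw [pvBest_cons]
    intro h p hp
    obtain ⟨hx, hl⟩ := pvMerge_eq_none _ _ h
    rcases List.mem_cons.mp hp with hp | hp
    · subst hp; simpa using hx
    · exact ih hl p hp

theorem pvBest_some (sp suffix : String) (l : List String) (m : Nat) (q : String) :
    l.foldl (pvStep sp suffix) none = some (m, q) →
      (∀ p ∈ l, ∀ j, pvPrio sp suffix p = some j → m ≤ j) ∧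
      l.find? (fun p => pvPrio sp suffix p == some m) = some q := by
  induction l generalizing m q with
  | nil => intro h; cases h
  | cons x l ih =>
    rw [pvBest_cons]
    intro h
    rcases hx : pvPrio sp suffix x with _ | k
    · rw [hx, Option.map_none, pvMerge_none_left] at h
      obtain ⟨hmin, hfind⟩ := ih m q h
      refine ⟨?_, ?_⟩
      · intro p hp j hj
        rcases List.mem_cons.mp hp with hp | hp
        · subst hp; rw [hx] at hj; cases hj
        · exact hmin p hp j hj
      · rw [List.find?_cons_of_neg (by simp [hx]), hfind]
    · rw [hx, Option.map_some] at h
      rcases hl : l.foldl (pvStep sp suffix) none with _ | ⟨m', r⟩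
      · rw [hl, pvMerge_none_right, Option.some_inj, Prod.mk.injEq] at h
        obtain ⟨hm, hq⟩ := h
        subst hm; subst hq
        refine ⟨?_, ?_⟩
        · intro p hp j hj
          rcases List.mem_cons.mp hp with hp | hp
          · subst hp; rw [hx] at hj; injection hj with hk; omega
          · rw [pvBest_none sp suffix l hl p hp] at hj; cases hj
        · rw [List.find?_cons_of_pos (by simp [hx])]
      · obtain ⟨hmin, hfind⟩ := ih m' r hl
        rw [hl] at h
        by_cases hlt : m' < k
        · rw [show pvMerge (some (k, x)) (some (m', r)) = some (m', r) by
              simp [pvMerge, hlt]] at h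
          rw [Option.some_inj, Prod.mk.injEq] at h
          obtain ⟨hm, hq⟩ := h
          subst hm; subst hq
          refine ⟨?_, ?_⟩
          · intro p hp j hj
            rcases List.mem_cons.mp hp with hp | hp
            · subst hp; rw [hx] at hj; injection hj with hk; omega
            · exact hmin p hp j hj
          · rw [List.find?_cons_of_neg (by simp [hx]; omega), hfind]
        · rw [show pvMerge (some (k, x)) (some (m', r)) = some (k, x) by
              simp [pvMerge, hlt]] at h
          rw [Option.some_inj, Prod.mk.injEq] at h
          obtain ⟨hm, hq⟩ := h
          subst hm; subst hq
          refine ⟨?_, ?_⟩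
          · intro p hp j hj
            rcases List.mem_cons.mp hp with hp | hp
            · subst hp; rw [hx] at hj; injection hj with hk; omega
            · have := hmin p hp j hj; omega
          · rw [List.find?_cons_of_pos (by simp [hx])]

theorem pvFind?_ext {α : Type} (f g : α → Bool) (l : List α)
    (h : ∀ p ∈ l, f p = g p) : l.find? f = l.find? g := by
  induction l with
  | nil => rfl
  | cons x l ih =>
    have hx := h x (by simp)
    by_cases hf : f x = true
    · rw [List.find?_cons_of_pos hf, List.find?_cons_of_pos (hx ▸ hf)]
    · rw [List.find?_cons_of_neg hf, List.find?_cons_of_neg (by rw [← hx]; exact hf),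
          ih (fun p hp => h p (by simp [hp]))]

-- A's stage-k condition holds → the priority exists and is ≤ k;
-- and the priority is exactly k → A's stage-k condition holds.
theorem pvPred1_prio (sp suffix p : String)
    (h : PySem.Str.endswith p "species_stats.csv" = true) :
    pvPrio sp suffix p = some 1 := by
  unfold pvPrio; rw [if_pos h]

theorem pvPrio1_pred (sp suffix p : String) (h : pvPrio sp suffix p = some 1) :
    PySem.Str.endswith p "species_stats.csv" = true := by
  simp only [pvPrio] at h; split_ifs at h <;> simp_all

theorem pvPred2_prio (sp suffix p : String)
    (h : PySem.Str.endswith (PySem.Str.lower p) suffix = true) :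
    ∃ t ≤ 2, pvPrio sp suffix p = some t := by
  simp only [pvPrio]; split_ifs <;> simp_all

theorem pvPrio2_pred (sp suffix p : String) (h : pvPrio sp suffix p = some 2) :
    PySem.Str.endswith (PySem.Str.lower p) suffix = true := by
  simp only [pvPrio] at h; split_ifs at h <;> simp_all

theorem pvPred3_prio (sp suffix p : String)
    (h : (PySem.Str.isIn "web_download" (PySem.Str.lower (PySem.Str.replace p "\\" "/")) &&
          PySem.Str.endswith (PySem.Str.lower (PySem.Str.replace p "\\" "/")) ".zip" &&
          PySem.Str.isIn sp (PySem.Str.lower (PySem.Str.replace p "\\" "/")) &&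
          (PySem.Str.isIn "species" (PySem.Str.lower (PySem.Str.replace p "\\" "/")) &&
           !PySem.Str.isIn "regional" (PySem.Str.lower (PySem.Str.replace p "\\" "/")))) = true) :
    ∃ t ≤ 3, pvPrio sp suffix p = some t := by
  simp only [pvPrio]; split_ifs <;> simp_all

theorem pvPrio3_pred (sp suffix p : String) (h : pvPrio sp suffix p = some 3) :
    (PySem.Str.isIn "web_download" (PySem.Str.lower (PySem.Str.replace p "\\" "/")) &&
     PySem.Str.endswith (PySem.Str.lower (PySem.Str.replace p "\\" "/")) ".zip" &&
     PySem.Str.isIn sp (PySem.Str.lower (PySem.Str.replace p "\\" "/")) &&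
     (PySem.Str.isIn "species" (PySem.Str.lower (PySem.Str.replace p "\\" "/")) &&
      !PySem.Str.isIn "regional" (PySem.Str.lower (PySem.Str.replace p "\\" "/")))) = true := by
  simp only [pvPrio] at h; split_ifs at h <;> simp_all

theorem pvPred4_prio (sp suffix p : String)
    (h : (PySem.Str.endswith (PySem.Str.lower p) ".zip" &&
          PySem.Str.isIn "ebird-trends" (PySem.Str.lower p) &&
          PySem.Str.isIn "species" (PySem.Str.lower p)) = true) :
    ∃ t ≤ 4, pvPrio sp suffix p = some t := by
  simp only [pvPrio]; split_ifs <;> simp_all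

theorem pvPrio4_pred (sp suffix p : String) (h : pvPrio sp suffix p = some 4) :
    (PySem.Str.endswith (PySem.Str.lower p) ".zip" &&
     PySem.Str.isIn "ebird-trends" (PySem.Str.lower p) &&
     PySem.Str.isIn "species" (PySem.Str.lower p)) = true := by
  simp only [pvPrio] at h; split_ifs at h <;> simp_all

theorem pvPred5_prio (sp suffix p : String)
    (h : (PySem.Str.endswith (PySem.Str.lower p) ".zip" &&
          PySem.Str.isIn "species" (PySem.Str.lower p) &&
          !PySem.Str.isIn "regional" (PySem.Str.lower p)) = true) :
    ∃ t ≤ 5, pvPrio sp suffix p = some t := by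
  simp only [pvPrio]; split_ifs <;> simp_all

theorem pvPrio5_pred (sp suffix p : String) (h : pvPrio sp suffix p = some 5) :
    (PySem.Str.endswith (PySem.Str.lower p) ".zip" &&
     PySem.Str.isIn "species" (PySem.Str.lower p) &&
     !PySem.Str.isIn "regional" (PySem.Str.lower p)) = true := by
  simp only [pvPrio] at h; split_ifs at h <;> simp_all

theorem pvPrio_none (sp suffix p : String) (h : pvPrio sp suffix p = none) :
    PySem.Str.endswith p "species_stats.csv" = false ∧
    PySem.Str.endswith (PySem.Str.lower p) suffix = false ∧
    (PySem.Str.isIn "web_download" (PySem.Str.lower (PySem.Str.replace p "\\" "/")) &&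
     PySem.Str.endswith (PySem.Str.lower (PySem.Str.replace p "\\" "/")) ".zip" &&
     PySem.Str.isIn sp (PySem.Str.lower (PySem.Str.replace p "\\" "/")) &&
     (PySem.Str.isIn "species" (PySem.Str.lower (PySem.Str.replace p "\\" "/")) &&
      !PySem.Str.isIn "regional" (PySem.Str.lower (PySem.Str.replace p "\\" "/")))) = false ∧
    (PySem.Str.endswith (PySem.Str.lower p) ".zip" &&
     PySem.Str.isIn "ebird-trends" (PySem.Str.lower p) &&
     PySem.Str.isIn "species" (PySem.Str.lower p)) = false ∧
    (PySem.Str.endswith (PySem.Str.lower p) ".zip" &&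
     PySem.Str.isIn "species" (PySem.Str.lower p) &&
     !PySem.Str.isIn "regional" (PySem.Str.lower p)) = false := by
  simp only [pvPrio] at h; split_ifs at h; simp_all

-- ===== VERDICT (by name: the statement is the Claim_ definition above) =====
theorem select_species_stats_obj_key_py_spec : Claim_equal_select_species_stats_obj_key_py := by
  intro paths species_code version_year _
  unfold Spec_select_species_stats_obj_key_py
  unfold select_species_stats_obj_key_py select_species_stats_obj_key_py_alt
  set sp := PySem.Str.lower (PySem.Str.strip species_code) with hsp
  set suffix := PySem.Str.join "" [sp, "_species_", PySem.Int.toStr version_year, ".zip"] with hsuf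
  simp only [← hsuf]
  rcases hb : paths.foldl (pvStep sp suffix) none with _ | ⟨m, q⟩
  · -- B found nothing: no priority matches, so every scan of A is empty
    have hnone := pvBest_none sp suffix paths hb
    have hall : ∀ (f : String → Bool),
        (∀ p, pvPrio sp suffix p = none → f p = false) → paths.find? f = none := by
      intro f hf
      exact List.find?_eq_none.mpr (fun p hp hc => by rw [hf p (hnone p hp)] at hc; cases hc)
    have h1 := hall _ (fun p h => (pvPrio_none sp suffix p h).1)
    have h2 := hall _ (fun p h => (pvPrio_none sp suffix p h).2.1)
    have h3 := hall _ (fun p h => (pvPrio_none sp suffix p h).2.2.1)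
    have h4 := hall _ (fun p h => (pvPrio_none sp suffix p h).2.2.2.1)
    have h5 := hall _ (fun p h => (pvPrio_none sp suffix p h).2.2.2.2)
    rw [h1, h2, h3, h4, h5]
    rfl
  · -- B found the earliest path q of minimal priority m
    obtain ⟨hmin, hfind⟩ := pvBest_some sp suffix paths m q hb
    have hq : pvPrio sp suffix q = some m := by
      have := List.find?_some hfind
      simpa using this
    have hm5 : 1 ≤ m ∧ m ≤ 5 := by
      simp only [pvPrio] at hq; split_ifs at hq <;> simp_all <;> omega
    -- a stage j < m of A finds nothing
    have hstage_none : ∀ (f : String → Bool) (j : Nat), j < m →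
        (∀ p, f p = true → ∃ t ≤ j, pvPrio sp suffix p = some t) →
        paths.find? f = none := by
      intro f j hj hf
      refine List.find?_eq_none.mpr (fun p hp hfp => ?_)
      obtain ⟨t, ht, hpt⟩ := hf p hfp
      have := hmin p hp t hpt
      omega
    -- stage m of A finds exactly q
    have hstage_m : ∀ (f : String → Bool),
        (∀ p, f p = true → ∃ t ≤ m, pvPrio sp suffix p = some t) →
        (∀ p, pvPrio sp suffix p = some m → f p = true) →
        paths.find? f = some q := by
      intro f hfwd hbwd
      rw [pvFind?_ext f (fun p => pvPrio sp suffix p == some m) paths, hfind]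
      intro p hp
      by_cases hfp : f p = true
      · obtain ⟨t, ht, hpt⟩ := hfwd p hfp
        have := hmin p hp t hpt
        have : t = m := by omega
        subst this
        simp [hfp, hpt]
      · simp only [Bool.not_eq_true] at hfp
        rw [hfp]
        rcases hpp : pvPrio sp suffix p with _ | t
        · simp
        · by_cases htm : t = m
          · subst htm; rw [hbwd p hpp] at hfp; cases hfp
          · simp [htm]
    obtain ⟨hm1, hm2⟩ := hm5
    interval_cases m
    · rw [hstage_m _ (fun p h => ⟨1, le_refl 1, pvPred1_prio sp suffix p h⟩)
            (pvPrio1_pred sp suffix)]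
      rfl
    · rw [hstage_none _ 1 (by omega)
            (fun p h => ⟨1, le_refl 1, pvPred1_prio sp suffix p h⟩),
          hstage_m _ (pvPred2_prio sp suffix) (pvPrio2_pred sp suffix)]
      rfl
    · rw [hstage_none _ 1 (by omega)
            (fun p h => ⟨1, le_refl 1, pvPred1_prio sp suffix p h⟩),
          hstage_none _ 2 (by omega) (pvPred2_prio sp suffix),
          hstage_m _ (pvPred3_prio sp suffix) (pvPrio3_pred sp suffix)]
      rfl
    · rw [hstage_none _ 1 (by omega)
            (fun p h => ⟨1, le_refl 1, pvPred1_prio sp suffix p h⟩),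
          hstage_none _ 2 (by omega) (pvPred2_prio sp suffix),
          hstage_none _ 3 (by omega) (pvPred3_prio sp suffix),
          hstage_m _ (pvPred4_prio sp suffix) (pvPrio4_pred sp suffix)]
      rfl
    · rw [hstage_none _ 1 (by omega)
            (fun p h => ⟨1, le_refl 1, pvPred1_prio sp suffix p h⟩),
          hstage_none _ 2 (by omega) (pvPred2_prio sp suffix),
          hstage_none _ 3 (by omega) (pvPred3_prio sp suffix),
          hstage_none _ 4 (by omega) (pvPred4_prio sp suffix),
          hstage_m _ (pvPred5_prio sp suffix) (pvPrio5_pred sp suffix)]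
      rfl
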